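-- pv_equiv track=rewrite | github.com/polegithub/visual_to_language | ImageProcessing/utils/net_compiler.py | dropannotation
-- ===== SOURCE A (Python) =====
-- def dropannotation(annotation_list):
--     """
--     Drop out the annotation contained in annotation_list
--     """
--     target = ""
--     for c in annotation_list:
--         if not c == "#":
--             target += c
--         else:
--             return target
--     return target
-- ===== SOURCE B (Python) =====
-- def dropannotation(annotation_list):
--     """
--     Drop out the annotation contained in annotation_list
--     """
--     return annotation_list.split("#", 1)[0]
-- ===== Notes on version B (the rewrite author's own statement) =====
-- stated objective: idiomatic
-- what changed: Replaced the explicit character-accumulation loop with its running target string and early-return branch by a single maxsplit-1 split call that takes the first piece.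
import Mathlib
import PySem

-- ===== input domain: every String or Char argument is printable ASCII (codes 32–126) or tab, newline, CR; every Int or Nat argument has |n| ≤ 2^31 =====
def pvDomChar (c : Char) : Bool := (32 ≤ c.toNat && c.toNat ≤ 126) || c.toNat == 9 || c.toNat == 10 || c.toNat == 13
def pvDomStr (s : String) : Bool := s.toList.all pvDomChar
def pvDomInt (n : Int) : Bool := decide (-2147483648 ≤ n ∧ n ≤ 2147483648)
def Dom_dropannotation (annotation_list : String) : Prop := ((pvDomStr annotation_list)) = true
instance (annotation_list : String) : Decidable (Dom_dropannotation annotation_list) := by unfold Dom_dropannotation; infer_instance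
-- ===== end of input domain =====

-- B replaces A's character-accumulation loop with split('#', 1)[0]; objective: idiomatic.

-- ===== PORT A =====
-- A's loop over the characters, carrying the running 'target'; early return on '#'.
def dropannotationGo : List Char → String → String
  | [], target => target
  | c :: rest, target =>
    if ¬ (c == '#') then dropannotationGo rest (target.push c) else target

def dropannotation (annotation_list : String) : String :=
  dropannotationGo annotation_list.toList ""

-- ===== PORT B =====
-- annotation_list.split("#", 1)[0]; split with a nonempty sep always returns a nonempty list,
-- so the getD/headD defaults are never used.
def dropannotation_alt (annotation_list : String) : String :=
  ((PySem.Str.splitMax? annotation_list "#" 1).getD []).headD ""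

-- ===== PRECONDITION & SPEC =====
def Spec_dropannotation (annotation_list : String) (out : String) : Prop := out = dropannotation_alt annotation_list
instance (annotation_list : String) (out : String) : Decidable (Spec_dropannotation annotation_list out) := by unfold Spec_dropannotation; infer_instance

-- ===== CLAIM (what is proved, stated in full; the proofs are below) =====
def Claim_equal_dropannotation : Prop := ∀ (annotation_list : String), Dom_dropannotation annotation_list → Spec_dropannotation annotation_list (dropannotation annotation_list)

-- ===== LEMMAS AND PROOFS =====

theorem dropannotationGo_eq (cs : List Char) (t : String) :
    dropannotationGo cs t = t ++ String.ofList (cs.takeWhile (· ≠ '#')) := by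
  induction cs generalizing t with
  | nil => simp [dropannotationGo]
  | cons c rest ih =>
    by_cases h : c = '#'
    · subst h; simp [dropannotationGo, List.takeWhile]
    · simp only [dropannotationGo, beq_iff_eq, h, not_false_iff, if_true, ih]
      rw [show t.push c = t ++ String.ofList [c] by ext1; simp,
        String.append_assoc, ← String.ofList_append]
      simp [List.takeWhile, h]

-- m = 0: the go loop returns immediately, for any fuel.
theorem splitOnMax_go_zero (sep : List Char) (fuel : Nat) (l cur : List Char)
    (acc : List (List Char)) :
    PySem.Chars.splitOnMax.go sep fuel 0 l cur acc = ((cur.reverse ++ l) :: acc).reverse := by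
  cases fuel with
  | zero => simp [PySem.Chars.splitOnMax.go]
  | succ n =>
    cases l with
    | nil => simp [PySem.Chars.splitOnMax.go]
    | cons c rest => simp [PySem.Chars.splitOnMax.go]

-- m = 1, sep = "#": the go loop produces the part before the first '#' (after acc/cur).
theorem splitOnMax_go_one (fuel : Nat) (cs cur : List Char) (acc : List (List Char))
    (h : cs.length ≤ fuel) :
    PySem.Chars.splitOnMax.go ['#'] fuel 1 cs cur acc =
      acc.reverse ++ (cur.reverse ++ cs.takeWhile (· ≠ '#')) ::
        (if '#' ∈ cs then [(cs.dropWhile (· ≠ '#')).tail] else []) := by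
  induction fuel generalizing cs cur acc with
  | zero =>
    have : cs = [] := List.eq_nil_of_length_eq_zero (Nat.le_zero.mp h)
    subst this
    simp [PySem.Chars.splitOnMax.go]
  | succ n ih =>
    cases cs with
    | nil => simp [PySem.Chars.splitOnMax.go]
    | cons c rest =>
      by_cases hc : c = '#'
      · subst hc
        have hpre : List.isPrefixOf ['#'] ('#' :: rest) = true := by
          simp [List.isPrefixOf]
        simp only [PySem.Chars.splitOnMax.go, hpre, if_true]
        rw [splitOnMax_go_zero]
        simp [List.takeWhile, List.dropWhile]
      · have hpre : List.isPrefixOf ['#'] (c :: rest) = false := by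
          simp [List.isPrefixOf]
          exact fun e => hc e.symm
        have hlen : rest.length ≤ n := Nat.le_of_succ_le_succ h
        simp only [PySem.Chars.splitOnMax.go, hpre]
        rw [if_neg (by simp), if_neg (by simp)]
        rw [ih rest (c :: cur) acc hlen]
        simp [List.takeWhile, List.dropWhile, hc, Ne.symm hc]

theorem dropannotation_alt_eq (s : String) :
    dropannotation_alt s = String.ofList (s.toList.takeWhile (· ≠ '#')) := by
  unfold dropannotation_alt
  have hsep : ("#" : String).toList = ['#'] := rfl
  simp only [PySem.Str.splitMax?, PySem.Chars.splitMax?, hsep]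
  rw [if_neg (by simp)]
  unfold PySem.Chars.splitOnMax
  rw [if_neg (by norm_num)]
  rw [show Int.toNat 1 = 1 from rfl,
    splitOnMax_go_one (s.toList.length + 1) s.toList [] [] (by omega)]
  by_cases h : '#' ∈ s.toList <;> simp [h]

-- ===== VERDICT (by name: the statement is the Claim_ definition above) =====
theorem dropannotation_spec : Claim_equal_dropannotation := by
  intro s _
  unfold Spec_dropannotation dropannotation
  rw [dropannotationGo_eq, dropannotation_alt_eq]
  simp
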